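-- pv_equiv track=rewrite | github.com/Tasmia09/Big-Data-Projects | Assignment08/src/preprocess.py | RemoveFeatures
-- ===== SOURCE A (Python) =====
-- def RemoveFeatures(data, features):
--     missing_feat = []
--     for key, values in data.items():
--         header = values[0]
--         for feat in features:
--             if feat not in header:
--                 missing_feat.append(feat)
--     missing_feat = set(missing_feat) # unique missing features
--     features = [feat for feat in features if feat not in missing_feat]
--     return features
-- ===== SOURCE B (Python) =====
-- def RemoveFeatures(data, features):
--     common = None
--     for values in data.values():
--         header = set(values[0])
--         common = header if common is None else common & header
--     if common is None:
--         return list(features)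
--     return [feat for feat in features if feat in common]
-- ===== Notes on version B (the rewrite author's own statement) =====
-- stated objective: faster
-- what changed: B intersects the headers into one common set and filters the features once, instead of A's nested loop that re-scans the whole feature list against every header to collect misses.
import Mathlib
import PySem

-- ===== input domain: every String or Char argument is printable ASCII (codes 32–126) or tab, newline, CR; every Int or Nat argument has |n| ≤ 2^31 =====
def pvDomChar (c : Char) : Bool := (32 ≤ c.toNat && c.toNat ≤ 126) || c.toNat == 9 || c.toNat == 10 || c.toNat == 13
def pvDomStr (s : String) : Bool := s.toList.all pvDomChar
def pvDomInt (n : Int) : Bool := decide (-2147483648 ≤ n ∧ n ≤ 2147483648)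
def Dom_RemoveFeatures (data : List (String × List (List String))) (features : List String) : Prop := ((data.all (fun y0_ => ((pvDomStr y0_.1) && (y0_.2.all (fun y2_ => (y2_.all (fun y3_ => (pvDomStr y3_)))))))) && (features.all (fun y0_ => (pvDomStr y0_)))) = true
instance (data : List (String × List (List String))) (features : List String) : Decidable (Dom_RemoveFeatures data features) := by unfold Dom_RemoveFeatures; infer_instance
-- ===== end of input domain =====

-- B builds the set of features common to all headers (a reduction by set intersection)
-- and filters the feature list once, instead of A's nested miss-collection pass; faster.

-- ===== PORT A =====
-- A: collect every feature missing from some header into a list, dedupe it to a set,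
-- then keep the features not in that set.  values[0] is ported as (pyGet? values 0).getD [];
-- Pre_ guarantees the index is in range, so the default is never taken on admitted inputs.
def RemoveFeatures (data : List (String × List (List String))) (features : List String) : List String :=
  let missing : List String := data.foldl (fun acc kv =>
      let header := (PySem.List.pyGet? kv.2 0).getD []
      features.foldl (fun acc2 feat =>
        if !(header.contains feat) then acc2 ++ [feat] else acc2) acc) []
  let missingSet : PySem.Set String := PySem.Set.ofList missing
  features.filter (fun feat => !(PySem.Set.contains missingSet feat))

-- ===== PORT B =====
-- B: fold the headers into an optional common set (none = no datasets yet), then filter once.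
def RemoveFeatures_alt (data : List (String × List (List String))) (features : List String) : List String :=
  let common : Option (PySem.Set String) := data.foldl (fun acc kv =>
      let header : PySem.Set String := PySem.Set.ofList ((PySem.List.pyGet? kv.2 0).getD [])
      match acc with
      | none => some header
      | some c => some (PySem.Set.inter c header)) none
  match common with
  | none => features
  | some c => features.filter (fun feat => PySem.Set.contains c feat)

-- ===== PRECONDITION & SPEC =====
-- Pre_ excludes exactly the inputs where some dataset's value list is empty: there
-- Python's values[0] raises IndexError (in A and in B alike).
def Pre_RemoveFeatures (data : List (String × List (List String))) (features : List String) : Prop :=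
  ∀ kv ∈ data, kv.2 ≠ []
instance (data : List (String × List (List String))) (features : List String) : Decidable (Pre_RemoveFeatures data features) := by unfold Pre_RemoveFeatures; infer_instance

def pvWitness_RemoveFeatures : (List (String × List (List String))) × List String :=
  ([("a", [["x", "y"]])], ["x", "z"])

def Spec_RemoveFeatures (data : List (String × List (List String))) (features : List String) (out : List String) : Prop := out = RemoveFeatures_alt data features
instance (data : List (String × List (List String))) (features : List String) (out : List String) : Decidable (Spec_RemoveFeatures data features out) := by unfold Spec_RemoveFeatures; infer_instance

-- ===== CLAIM (what is proved, stated in full; the proofs are below) =====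
def Claim_equal_RemoveFeatures : Prop := ∀ (data : List (String × List (List String))) (features : List String), Dom_RemoveFeatures data features → Pre_RemoveFeatures data features → Spec_RemoveFeatures data features (RemoveFeatures data features)

-- ===== LEMMAS AND PROOFS =====

-- the header a dataset entry contributes
def pvHeader (kv : String × List (List String)) : List String :=
  (PySem.List.pyGet? kv.2 0).getD []

-- A's missing list contains f iff f is a feature missing from some header
theorem mem_missing (features : List String) (f : String) :
    ∀ (data : List (String × List (List String))) (acc : List String),
    (f ∈ data.foldl (fun acc kv =>
        let header := (PySem.List.pyGet? kv.2 0).getD []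
        features.foldl (fun acc2 feat =>
          if !(header.contains feat) then acc2 ++ [feat] else acc2) acc) acc)
      ↔ f ∈ acc ∨ ∃ kv ∈ data, f ∈ features ∧ f ∉ pvHeader kv := by
  intro data
  induction data with
  | nil => intro acc; simp
  | cons kv rest ih =>
    intro acc
    rw [List.foldl_cons]
    have hstep :
        (let header := (PySem.List.pyGet? kv.2 0).getD []
         features.foldl (fun acc2 feat =>
           if !(header.contains feat) then acc2 ++ [feat] else acc2) acc)
        = acc ++ features.filter (fun feat => !((pvHeader kv).contains feat)) := by
      simpa [pvHeader] using
        PySem.List.foldl_append_if_eq_filter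
          (p := fun feat => !(((PySem.List.pyGet? kv.2 0).getD []).contains feat))
          (l := features) (acc := acc)
    rw [hstep, ih]
    simp only [List.mem_append, List.mem_filter, List.mem_cons, Bool.not_eq_true',
      List.contains_eq_mem, decide_eq_false_iff_not]
    constructor
    · rintro (⟨ha | ⟨hfeat, hnot⟩⟩ | ⟨kv', hk, hfeat, hnot⟩)
      · exact Or.inl ha
      · exact Or.inr ⟨kv, Or.inl rfl, hfeat, hnot⟩
      · exact Or.inr ⟨kv', Or.inr hk, hfeat, hnot⟩
    · rintro (ha | ⟨kv', (rfl | hk), hfeat, hnot⟩)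
      · exact Or.inl (Or.inl ha)
      · exact Or.inl (Or.inr ⟨hfeat, hnot⟩)
      · exact Or.inr ⟨kv', hk, hfeat, hnot⟩

-- B's fold, started from some c, yields a set whose members are those of c present in every header
theorem foldlB_some (data : List (String × List (List String))) (c : PySem.Set String) :
    ∃ c', (data.foldl (fun acc kv =>
        let header : PySem.Set String := PySem.Set.ofList ((PySem.List.pyGet? kv.2 0).getD [])
        match acc with
        | none => some header
        | some c => some (PySem.Set.inter c header)) (some c)) = some c'
      ∧ ∀ f, f ∈ c' ↔ f ∈ c ∧ ∀ kv ∈ data, f ∈ pvHeader kv := by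
  induction data generalizing c with
  | nil => exact ⟨c, rfl, by simp⟩
  | cons kv rest ih =>
    obtain ⟨c', hc', hmem⟩ :=
      ih (PySem.Set.inter c (PySem.Set.ofList ((PySem.List.pyGet? kv.2 0).getD [])))
    refine ⟨c', by simpa using hc', ?_⟩
    intro f
    rw [hmem f]
    simp only [PySem.Set.mem_inter, PySem.Set.mem_ofList]
    constructor
    · rintro ⟨⟨hc, hh⟩, hrest⟩
      refine ⟨hc, ?_⟩
      intro kv' hk
      rcases List.mem_cons.mp hk with rfl | hk'
      · simpa [pvHeader] using hh
      · exact hrest kv' hk'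
    · rintro ⟨hc, hall⟩
      exact ⟨⟨hc, by simpa [pvHeader] using hall kv (List.mem_cons_self ..)⟩,
        fun kv' hk => hall kv' (List.mem_cons.mpr (Or.inr hk))⟩

theorem ports_agree (data : List (String × List (List String))) (features : List String) :
    RemoveFeatures data features = RemoveFeatures_alt data features := by
  cases data with
  | nil =>
    unfold RemoveFeatures RemoveFeatures_alt
    simp
  | cons kv rest =>
    unfold RemoveFeatures RemoveFeatures_alt
    obtain ⟨c', hc', hmem⟩ :=
      foldlB_some rest (PySem.Set.ofList ((PySem.List.pyGet? kv.2 0).getD []))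
    have hc2 : (List.foldl (fun (acc : Option (PySem.Set String)) kv =>
        let header : PySem.Set String := PySem.Set.ofList ((PySem.List.pyGet? kv.2 0).getD [])
        match acc with
        | none => some header
        | some c => some (PySem.Set.inter c header)) none (kv :: rest)) = some c' := hc'
    rw [hc2]
    apply List.filter_congr
    intro f hf
    refine Bool.eq_iff_iff.mpr ?_
    have h1 : ((PySem.Set.ofList ((kv :: rest).foldl (fun acc kv =>
          let header := (PySem.List.pyGet? kv.2 0).getD []
          features.foldl (fun acc2 feat =>
            if !(header.contains feat) then acc2 ++ [feat] else acc2) acc) [])).contains f = true)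
        ↔ ∃ kv' ∈ (kv :: rest), f ∈ features ∧ f ∉ pvHeader kv' := by
      rw [PySem.Set.contains_iff, PySem.Set.mem_ofList, mem_missing]
      simp
    have h2 : (PySem.Set.contains c' f = true) ↔ ∀ kv' ∈ (kv :: rest), f ∈ pvHeader kv' := by
      rw [PySem.Set.contains_iff, hmem f, PySem.Set.mem_ofList]
      constructor
      · rintro ⟨h0, hrest⟩ kv' hk
        rcases List.mem_cons.mp hk with rfl | hk'
        · simpa [pvHeader] using h0
        · exact hrest kv' hk'
      · intro hall
        exact ⟨by simpa [pvHeader] using hall kv (List.mem_cons_self ..),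
          fun kv' hk => hall kv' (List.mem_cons.mpr (Or.inr hk))⟩
    rw [Bool.not_eq_true', ← Bool.not_eq_true, h1, h2]
    constructor
    · intro hno kv' hk
      by_contra hnot
      exact hno ⟨kv', hk, hf, hnot⟩
    · rintro hall ⟨kv', hk, _, hnot⟩
      exact hnot (hall kv' hk)

-- ===== VERDICT (by name: the statement is the Claim_ definition above) =====
theorem RemoveFeatures_spec : Claim_equal_RemoveFeatures := by
  intro data features _ _
  unfold Spec_RemoveFeatures
  exact ports_agree data features
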